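-- pv_equiv track=rewrite | github.com/every-algorithm/python | hashing/daitchmokotoff_soundex.py | dm_soundex
-- ===== SOURCE A (Python) =====
-- def dm_soundex(name):
--     # preprocess
--     name = name.upper()
--     # remove non-letters
--     name = ''.join([c for c in name if c.isalpha()])
--
--     mapping = {
--         # Vowels and Y are ignored
--         'A': '', 'E': '', 'I': '', 'O': '', 'U': '', 'Y': '',
--         'B': '1', 'P': '1',
--         'V': '2', 'F': '2',
--         'M': '3', 'N': '3',
--         'L': '4',
--         'R': '5',
--         'H': '6',
--         'W': '7',
--         'J': '8',
--         # digraphs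
--         'CH': '71',
--         'SH': '8',
--         'PH': '63',
--         'GH': '82',
--         'TH': '65',
--         'CZ': '81',
--         'TS': '81',
--     }
--
--     code = ''
--     i = 0
--     while i < len(name):
--         # check digraph first
--         if i + 1 < len(name) and name[i:i+2] in mapping:
--             code += mapping[name[i:i+2]]
--             i += 2
--         else:
--             code += mapping.get(name[i], '')
--             i += 1
--
--     # remove consecutive duplicates
--     deduped = ''
--     prev = ''
--     for c in code:
--         if c != prev:
--             deduped += c
--             prev = c
--     code = deduped
--
--     # pad or truncate to 8 digits
--     code = code.ljust(8, '0')[:4]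
--
--     return code
-- ===== SOURCE B (Python) =====
-- def dm_soundex(name):
--     mapping = {
--         # Vowels and Y are ignored
--         'A': '', 'E': '', 'I': '', 'O': '', 'U': '', 'Y': '',
--         'B': '1', 'P': '1',
--         'V': '2', 'F': '2',
--         'M': '3', 'N': '3',
--         'L': '4',
--         'R': '5',
--         'H': '6',
--         'W': '7',
--         'J': '8',
--         # digraphs
--         'CH': '71',
--         'SH': '8',
--         'PH': '63',
--         'GH': '82',
--         'TH': '65',
--         'CZ': '81',
--         'TS': '81',
--     }
--     # letters that can start a two-letter key of the table
--     starters = 'CSPGT'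
--
--     # streaming automaton: one character at a time, a pending possible
--     # digraph-starter carried in the state -- no index, no lookahead slice
--     parts = []
--     pending = ''
--     for c in name.upper():
--         if not c.isalpha():
--             continue
--         if pending:
--             key = pending + c
--             pending = ''
--             if key in mapping:
--                 parts.append(mapping[key])
--                 continue
--             parts.append(mapping.get(key[0], ''))
--         if c in starters:
--             pending = c
--         else:
--             parts.append(mapping.get(c, ''))
--     if pending:
--         parts.append(mapping.get(pending, ''))
--
--     code = ''.join(parts)
--     # collapse runs: keep first char, then every char differing from its left neighbour
--     deduped = code[:1] + ''.join(b for a, b in zip(code, code[1:]) if b != a)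
--     return (deduped + '0000')[:4]
-- ===== Notes on version B (the rewrite author's own statement) =====
-- stated objective: alternative
-- what changed: B replaces A's index-based greedy scan with two-character lookahead slices (map everything into a string via repeated +=, then a separate prev-accumulator dedup loop, then ljust) by a streaming automaton that reads one character at a time with a carried pending digraph-starter state (no indexing or slicing, cleaning fused into the stream, digits collected in a list and joined once), then collapses runs with a zip(code, code[1:]) comprehension and pads by concatenation; the soundex table itself is shared data.
import Mathlib
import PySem

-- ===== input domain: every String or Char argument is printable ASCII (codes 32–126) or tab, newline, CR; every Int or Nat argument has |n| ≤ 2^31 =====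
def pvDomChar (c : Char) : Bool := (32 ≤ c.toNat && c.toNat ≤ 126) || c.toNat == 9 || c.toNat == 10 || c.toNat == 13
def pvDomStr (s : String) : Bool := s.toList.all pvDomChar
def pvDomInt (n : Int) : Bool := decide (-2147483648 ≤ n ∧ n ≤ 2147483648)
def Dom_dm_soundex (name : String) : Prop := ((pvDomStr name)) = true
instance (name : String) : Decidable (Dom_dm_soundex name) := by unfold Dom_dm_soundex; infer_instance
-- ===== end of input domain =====

-- B replaces A's lookahead-slice greedy scan + separate dedup pass by a streaming
-- one-character automaton with a pending digraph-starter state and a zip-based run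
-- collapse (objective: alternative); the soundex table is shared data.

-- the soundex table (shared data literal of both Pythons), at the List-Char level
def dmMapping : PySem.Dict (List Char) (List Char) := PySem.Dict.ofList [
  (['A'], []), (['E'], []), (['I'], []), (['O'], []), (['U'], []), (['Y'], []),
  (['B'], ['1']), (['P'], ['1']),
  (['V'], ['2']), (['F'], ['2']),
  (['M'], ['3']), (['N'], ['3']),
  (['L'], ['4']),
  (['R'], ['5']),
  (['H'], ['6']),
  (['W'], ['7']),
  (['J'], ['8']),
  (['C','H'], ['7','1']),
  (['S','H'], ['8']),
  (['P','H'], ['6','3']),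
  (['G','H'], ['8','2']),
  (['T','H'], ['6','5']),
  (['C','Z'], ['8','1']),
  (['T','S'], ['8','1'])]

-- ===== PORT A =====
-- A's 'if c != prev: append c; prev = c' dedup-loop body
def dmDedupStep (s : List Char × Option Char) (c : Char) : List Char × Option Char :=
  if s.2 ≠ some c then (s.1 ++ [c], some c) else s

-- A's while loop: digraph first (needs i+1 < len), else single char with default ''
def dmCodeFrom : List Char → List Char
  | [] => []
  | [c] => dmMapping.getD [c] []
  | c :: d :: rest =>
    if dmMapping.contains [c, d] then dmMapping.getD [c, d] [] ++ dmCodeFrom rest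
    else dmMapping.getD [c] [] ++ dmCodeFrom (d :: rest)

def dm_soundex (name : String) : String :=
  -- name.upper(), then keep the alphabetic characters
  let letters := (PySem.Str.upper name).toList.filter (fun c => PySem.Chars.isalpha c)
  let code := dmCodeFrom letters
  -- remove consecutive duplicates (for-loop with accumulator and prev)
  let deduped := (code.foldl dmDedupStep ([], none)).1
  -- code.ljust(8, '0')[:4]  ([:4] on a list is take 4)
  String.ofList ((deduped ++ List.replicate (8 - deduped.length) '0').take 4)

-- ===== PORT B =====
-- the characters that can start a two-letter key of the table
def dmStarters : List Char := ['C', 'S', 'P', 'G', 'T']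

-- B's loop body: one character through the automaton (state = emitted parts, pending starter)
def dmAutoStep (st : List (List Char) × Option Char) (c : Char) : List (List Char) × Option Char :=
  if ¬ PySem.Chars.isalpha c then st
  else
    match st.2 with
    | some p =>
      if dmMapping.contains [p, c] then (st.1 ++ [dmMapping.getD [p, c] []], none)
      else
        let parts := st.1 ++ [dmMapping.getD [p] []]
        if c ∈ dmStarters then (parts, some c) else (parts ++ [dmMapping.getD [c] []], none)
    | none =>
      if c ∈ dmStarters then (st.1, some c) else (st.1 ++ [dmMapping.getD [c] []], none)

def dm_soundex_alt (name : String) : String :=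
  let st := (PySem.Str.upper name).toList.foldl dmAutoStep ([], none)
  -- final flush of a pending starter
  let parts := match st.2 with
    | some p => st.1 ++ [dmMapping.getD [p] []]
    | none => st.1
  let code := parts.flatten   -- ''.join(parts)
  -- code[:1] + ''.join(b for a, b in zip(code, code[1:]) if b != a)
  let deduped := code.take 1 ++ ((code.zip code.tail).filter (fun ab => ab.2 ≠ ab.1)).map Prod.snd
  String.ofList ((deduped ++ ['0', '0', '0', '0']).take 4)

-- ===== PRECONDITION & SPEC =====
def Spec_dm_soundex (name : String) (out : String) : Prop := out = dm_soundex_alt name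
instance (name : String) (out : String) : Decidable (Spec_dm_soundex name out) := by unfold Spec_dm_soundex; infer_instance

-- ===== CLAIM (what is proved, stated in full; the proofs are below) =====
def Claim_equal_dm_soundex : Prop := ∀ (name : String), Dom_dm_soundex name → Spec_dm_soundex name (dm_soundex name)

-- ===== LEMMAS AND PROOFS =====

-- the common reference dedup recursion both dedup ports are compared to
def dmDedupR : Option Char → List Char → List Char
  | _, [] => []
  | prev, c :: cs => if some c ≠ prev then c :: dmDedupR (some c) cs else dmDedupR prev cs

-- A's dedup fold computes dmDedupR
theorem dedup_fold_eq (l : List Char) : ∀ acc prev,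
    (l.foldl dmDedupStep (acc, prev)).1 = acc ++ dmDedupR prev l := by
  induction l with
  | nil => intro acc prev; simp [dmDedupR]
  | cons c cs ih =>
    intro acc prev
    by_cases h : prev = some c
    · simp [List.foldl_cons, dmDedupStep, dmDedupR, h, ih]
    · have h' : some c ≠ prev := fun e => h e.symm
      simp [List.foldl_cons, dmDedupStep, dmDedupR, h, h', ih]

-- B's zip comprehension computes dmDedupR (aux: a fixed left neighbour c)
theorem dedup_zip_aux (cs : List Char) : ∀ c,
    ((List.zipWith Prod.mk (c :: cs) cs).filter (fun ab => ab.2 ≠ ab.1)).map Prod.snd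
      = dmDedupR (some c) cs := by
  induction cs with
  | nil => intro c; simp [dmDedupR]
  | cons d ds ih =>
    intro c
    have ihd := ih d
    simp only [ne_eq, decide_not] at ihd
    by_cases h : d = c
    · subst h; simp [dmDedupR, ihd]
    · simp [dmDedupR, h, ihd]

theorem dedup_zip_eq (l : List Char) :
    l.take 1 ++ ((l.zip l.tail).filter (fun ab => ab.2 ≠ ab.1)).map Prod.snd
      = dmDedupR none l := by
  cases l with
  | nil => simp [dmDedupR]
  | cons c cs =>
    have ih := dedup_zip_aux cs c
    simp only [ne_eq, decide_not] at ih
    simp [List.zip, dmDedupR, ih]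

-- non-alphabetic characters leave the automaton state untouched
theorem foldl_auto_filter (l : List Char) : ∀ st,
    l.foldl dmAutoStep st = (l.filter (fun c => PySem.Chars.isalpha c)).foldl dmAutoStep st := by
  induction l with
  | nil => intro st; rfl
  | cons c cs ih =>
    intro st
    by_cases h : PySem.Chars.isalpha c
    · simp [h, List.foldl_cons, ih]
    · simp [h, List.foldl_cons, dmAutoStep, ih]

-- every two-character key of the table starts with a starter
theorem contains_starter {c d : Char} (h : dmMapping.contains [c, d] = true) : c ∈ dmStarters := by
  have hi : dmMapping.items = [
    (['A'], []), (['E'], []), (['I'], []), (['O'], []), (['U'], []), (['Y'], []),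
    (['B'], ['1']), (['P'], ['1']),
    (['V'], ['2']), (['F'], ['2']),
    (['M'], ['3']), (['N'], ['3']),
    (['L'], ['4']),
    (['R'], ['5']),
    (['H'], ['6']),
    (['W'], ['7']),
    (['J'], ['8']),
    (['C','H'], ['7','1']),
    (['S','H'], ['8']),
    (['P','H'], ['6','3']),
    (['G','H'], ['8','2']),
    (['T','H'], ['6','5']),
    (['C','Z'], ['8','1']),
    (['T','S'], ['8','1'])] := by decide
  simp [PySem.Dict.contains, hi] at h
  simp [dmStarters]
  rcases h with h|h|h|h|h|h|h <;> tauto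

-- A's code recursion steps over a non-starter head
theorem dmCodeFrom_nonstarter {c : Char} (h : c ∉ dmStarters) (rest : List Char) :
    dmCodeFrom (c :: rest) = dmMapping.getD [c] [] ++ dmCodeFrom rest := by
  cases rest with
  | nil => simp [dmCodeFrom]
  | cons d ds =>
    have hc : dmMapping.contains [c, d] = false := by
      cases hcd : dmMapping.contains [c, d] with
      | false => rfl
      | true => exact absurd (contains_starter hcd) h
    simp [dmCodeFrom, hc]

def dmFlush (st : List (List Char) × Option Char) : List (List Char) :=
  match st.2 with
  | some p => st.1 ++ [dmMapping.getD [p] []]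
  | none => st.1

-- the automaton over an all-alphabetic list computes A's greedy code
theorem auto_main : ∀ (ls : List Char),
    (∀ x ∈ ls, PySem.Chars.isalpha x = true) → ∀ (acc : List (List Char)) (p : Option Char),
    (dmFlush (ls.foldl dmAutoStep (acc, p))).flatten
      = acc.flatten ++ dmCodeFrom (p.toList ++ ls) := by
  intro ls
  induction ls with
  | nil =>
    intro _ acc p
    cases p with
    | none => simp [dmFlush, dmCodeFrom]
    | some q => simp [dmFlush, dmCodeFrom]
  | cons c rest ih =>
    intro hall acc p
    have ha : PySem.Chars.isalpha c = true := hall c (List.mem_cons_self ..)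
    have hrest := fun x hx => hall x (List.mem_cons_of_mem _ hx)
    cases p with
    | none =>
      by_cases hs : c ∈ dmStarters
      · simp [List.foldl_cons, dmAutoStep, ha, hs, ih hrest]
      · simp [List.foldl_cons, dmAutoStep, ha, hs, ih hrest, dmCodeFrom_nonstarter hs rest]
    | some q =>
      by_cases hd : dmMapping.contains [q, c] = true
      · simp [List.foldl_cons, dmAutoStep, ha, hd, ih hrest, dmCodeFrom]
      · have hd' : dmMapping.contains [q, c] = false := by
          revert hd; cases dmMapping.contains [q, c] <;> simp
        by_cases hs : c ∈ dmStarters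
        · simp [List.foldl_cons, dmAutoStep, ha, hd', hs, ih hrest, dmCodeFrom]
        · simp [List.foldl_cons, dmAutoStep, ha, hd', hs, ih hrest, dmCodeFrom,
                dmCodeFrom_nonstarter hs rest]

-- padding: since only 4 characters are kept, ljust(8,'0') and +'0000' agree
theorem pad_take (l : List Char) :
    (l ++ List.replicate (8 - l.length) '0').take 4 = (l ++ ['0', '0', '0', '0']).take 4 := by
  have h4 : (['0', '0', '0', '0'] : List Char) = List.replicate 4 '0' := rfl
  rw [h4, List.take_append, List.take_append, List.take_replicate, List.take_replicate]
  congr 2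
  omega

-- ===== VERDICT (by name: the statement is the Claim_ definition above) =====
theorem dm_soundex_spec : Claim_equal_dm_soundex := by
  intro name _
  unfold Spec_dm_soundex
  dsimp only [dm_soundex, dm_soundex_alt]
  rw [foldl_auto_filter, dedup_fold_eq, dedup_zip_eq, pad_take]
  have h := auto_main ((PySem.Str.upper name).toList.filter (fun c => PySem.Chars.isalpha c))
    (fun x hx => (List.mem_filter.mp hx).2) [] none
  simp only [dmFlush] at h ⊢
  rw [h]
  simp
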